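-- pv_equiv track=rewrite | github.com/jk-jung/problem-solving | codewars/6kyu/6_N-centered Array.py | is_centered
-- ===== SOURCE A (Python) =====
-- def is_centered(v,n):
--     if not v: return False
--     if n == 0 and len(v) % 2 == 0: return True
--     b = len(v) // 2
--     a = (len(v) - 1) // 2
--
--     s = v[a] if a == b else v[a] + v[b]
--     while True:
--         if s == n: return True
--         a -= 1
--         b += 1
--         if a < 0 or b >= len(v): return False
--         s += v[a]
--         s += v[b]
-- ===== SOURCE B (Python) =====
-- def is_centered(v, n):
--     if not v:
--         return False
--     pre = [0]
--     for x in v: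
--         pre.append(pre[-1] + x)
--     L = len(v)
--     return any(pre[L - k] - pre[k] == n for k in range(L // 2 + 1))
-- ===== Notes on version B (the rewrite author's own statement) =====
-- stated objective: simpler
-- what changed: Replaces A's center-outward expanding-window loop (with a separate special case for n==0 on even length) by a prefix-sum array and a single uniform scan over all centered windows, where the empty center window naturally covers the n==0/even case.
import Mathlib
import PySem

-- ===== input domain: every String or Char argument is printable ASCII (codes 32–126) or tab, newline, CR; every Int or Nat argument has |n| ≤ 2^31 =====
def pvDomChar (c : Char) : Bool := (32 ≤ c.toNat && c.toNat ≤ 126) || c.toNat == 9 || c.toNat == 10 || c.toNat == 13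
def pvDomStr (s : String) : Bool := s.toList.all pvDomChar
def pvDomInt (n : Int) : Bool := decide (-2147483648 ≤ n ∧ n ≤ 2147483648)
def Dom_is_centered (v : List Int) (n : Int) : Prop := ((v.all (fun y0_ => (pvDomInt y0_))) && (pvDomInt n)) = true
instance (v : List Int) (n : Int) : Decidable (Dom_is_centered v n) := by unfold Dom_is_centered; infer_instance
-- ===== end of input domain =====

-- B replaces A's center-outward expanding-window loop by a prefix-sum array scanned over all
-- centered windows (simpler: no special case for n == 0 / even length is needed).

-- ===== PORT A =====
-- the 'while True' loop of A: state s (current window sum), a, b (window ends)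
def isCenteredLoop (v : List Int) (n s a b : Int) : Bool :=
  if s = n then true
  else if h : a - 1 < 0 ∨ b + 1 ≥ (v.length : Int) then false
  else isCenteredLoop v n (s + PySem.List.pyGetD v (a - 1) 0 + PySem.List.pyGetD v (b + 1) 0)
         (a - 1) (b + 1)
termination_by a.toNat
decreasing_by omega

def is_centered (v : List Int) (n : Int) : Bool :=
  if v = [] then false
  else if n = 0 ∧ PySem.Int.mod (v.length : Int) 2 = 0 then true
  else
    let b := PySem.Int.floordiv (v.length : Int) 2
    let a := PySem.Int.floordiv ((v.length : Int) - 1) 2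
    let s := if a = b then PySem.List.pyGetD v a 0
             else PySem.List.pyGetD v a 0 + PySem.List.pyGetD v b 0
    isCenteredLoop v n s a b

-- ===== PORT B =====
def is_centered_alt (v : List Int) (n : Int) : Bool :=
  if v = [] then false
  else
    let pre := v.foldl (fun acc x => acc ++ [PySem.List.pyGetD acc (-1) 0 + x]) [0]
    let L : Int := (v.length : Int)
    (PySem.List.pyRange 0 (PySem.Int.floordiv L 2 + 1) 1).any
      (fun k => decide (PySem.List.pyGetD pre (L - k) 0 - PySem.List.pyGetD pre k 0 = n))

-- ===== PRECONDITION & SPEC =====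
def Spec_is_centered (v : List Int) (n : Int) (out : Bool) : Prop := out = is_centered_alt v n
instance (v : List Int) (n : Int) (out : Bool) : Decidable (Spec_is_centered v n out) := by unfold Spec_is_centered; infer_instance

-- ===== CLAIM (what is proved, stated in full; the proofs are below) =====
def Claim_equal_is_centered : Prop := ∀ (v : List Int) (n : Int), Dom_is_centered v n → Spec_is_centered v n (is_centered v n)

-- ===== LEMMAS AND PROOFS =====

-- sum of the centered window v[j : L-j]  (as difference of prefix sums)
def Wsum (v : List Int) (j : Nat) : Int :=
  (v.take (v.length - j)).sum - (v.take j).sum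

theorem sum_take_succ (v : List Int) (m : Nat) (h : m < v.length) :
    (v.take (m + 1)).sum = (v.take m).sum + v[m] := by
  rw [List.take_add_one, List.sum_append]
  simp [List.getElem?_eq_getElem h]

-- A's loop computes "some window from j = a inward matches n"
theorem loop_eq (v : List Int) (n : Int) (a : Nat) (ha : a < v.length) :
    isCenteredLoop v n (Wsum v a) (a : Int) ((v.length : Int) - 1 - (a : Int)) =
      (List.range (a + 1)).any (fun j => decide (Wsum v j = n)) := by
  induction a with
  | zero =>
    rw [isCenteredLoop]
    by_cases h : Wsum v 0 = n
    · simp [h]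
    · simp [h]
  | succ a ih =>
    rw [isCenteredLoop]
    by_cases h : Wsum v (a + 1) = n
    · simp [h, List.range_succ]
    · have hcond : ¬ (((a + 1 : Nat) : Int) - 1 < 0 ∨
          ((v.length : Int) - 1 - ((a + 1 : Nat) : Int)) + 1 ≥ (v.length : Int)) := by
        push_cast; omega
      rw [if_neg h, dif_neg hcond]
      have e1 : ((a + 1 : Nat) : Int) - 1 = (a : Int) := by push_cast; omega
      have e2 : ((v.length : Int) - 1 - ((a + 1 : Nat) : Int)) + 1 =
          ((v.length - (a + 1) : Nat) : Int) := by push_cast; omega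
      have hlt : v.length - (a + 1) < v.length := by omega
      have hs : Wsum v (a + 1) + PySem.List.pyGetD v ((a : Nat) : Int) 0 +
          PySem.List.pyGetD v ((v.length - (a + 1) : Nat) : Int) 0 = Wsum v a := by
        rw [PySem.List.pyGetD_natCast, PySem.List.pyGetD_natCast,
            List.getD_eq_getElem _ _ (by omega), List.getD_eq_getElem _ _ hlt]
        unfold Wsum
        have t1 : v.length - a = (v.length - (a + 1)) + 1 := by omega
        rw [t1, sum_take_succ v (v.length - (a + 1)) hlt, sum_take_succ v a (by omega)]
        ring
      rw [e1, e2, hs]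
      have e3 : ((v.length - (a + 1) : Nat) : Int) = (v.length : Int) - 1 - (a : Int) := by
        omega
      rw [e3, ih (by omega)]
      simp [List.range_succ, h]

-- B's prefix list, built from an arbitrary seed
def preScan (c : Int) : List Int → List Int
  | [] => [c]
  | x :: xs => c :: preScan (c + x) xs

theorem foldl_preScan (v : List Int) : ∀ (ys : List Int) (c : Int),
    v.foldl (fun acc x => acc ++ [PySem.List.pyGetD acc (-1) 0 + x]) (ys ++ [c]) =
      ys ++ preScan c v := by
  induction v with
  | nil => intro ys c; simp [preScan]
  | cons x xs ih =>
    intro ys c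
    rw [List.foldl_cons]
    have h1 : (ys ++ [c]) ++ [PySem.List.pyGetD (ys ++ [c]) (-1) 0 + x] =
        (ys ++ [c]) ++ [c + x] := by
      rw [PySem.List.pyGetD_neg_one_append_singleton]
    show xs.foldl _ ((ys ++ [c]) ++ [PySem.List.pyGetD (ys ++ [c]) (-1) 0 + x]) = _
    rw [h1, ih (ys ++ [c]) (c + x)]
    simp [preScan]

theorem preScan_getD (v : List Int) : ∀ (c : Int) (i : Nat), i ≤ v.length →
    (preScan c v).getD i 0 = c + (v.take i).sum := by
  induction v with
  | nil =>
    intro c i h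
    simp only [List.length_nil, Nat.le_zero] at h
    subst h
    simp [preScan]
  | cons x xs ih =>
    intro c i h
    cases i with
    | zero => simp [preScan]
    | succ i =>
      simp only [preScan, List.getD_cons_succ, List.take_succ_cons, List.sum_cons]
      rw [ih (c + x) i (by simpa using h)]
      ring

-- characterisation of B
theorem alt_char (v : List Int) (n : Int) (hv : v ≠ []) :
    is_centered_alt v n =
      (List.range (v.length / 2 + 1)).any (fun j => decide (Wsum v j = n)) := by
  unfold is_centered_alt
  rw [if_neg hv]
  show (PySem.List.pyRange 0
      (PySem.Int.floordiv ((v.length : Int)) 2 + 1) 1).any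
      (fun k => decide (PySem.List.pyGetD
          (v.foldl (fun acc x => acc ++ [PySem.List.pyGetD acc (-1) 0 + x]) [0])
          ((v.length : Int) - k) 0 -
        PySem.List.pyGetD
          (v.foldl (fun acc x => acc ++ [PySem.List.pyGetD acc (-1) 0 + x]) [0]) k 0 = n)) = _
  have hpre : v.foldl (fun acc x => acc ++ [PySem.List.pyGetD acc (-1) 0 + x]) [0] =
      preScan 0 v := by
    have := foldl_preScan v [] 0
    simpa using this
  rw [hpre]
  have hfd : PySem.Int.floordiv (v.length : Int) 2 + 1 = ((v.length / 2 + 1 : Nat) : Int) := by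
    rw [PySem.Int.floordiv_eq_ediv_of_pos (by norm_num)]
    push_cast
    omega
  rw [hfd, PySem.List.pyRange_zero_nat, List.any_map]
  have key : ∀ j : Nat, j < v.length / 2 + 1 →
      PySem.List.pyGetD (preScan 0 v) ((v.length : Int) - ((j : Nat) : Int)) 0 -
        PySem.List.pyGetD (preScan 0 v) (((j : Nat) : Int)) 0 = Wsum v j := by
    intro j hj
    have hjle : j ≤ v.length / 2 := by omega
    have e1 : (v.length : Int) - ((j : Nat) : Int) = ((v.length - j : Nat) : Int) := by
      omega
    rw [e1, PySem.List.pyGetD_natCast, PySem.List.pyGetD_natCast,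
        preScan_getD v 0 (v.length - j) (by omega), preScan_getD v 0 j (by omega)]
    unfold Wsum
    ring
  rw [Bool.eq_iff_iff]
  simp only [List.any_eq_true, List.mem_range, Function.comp_apply, decide_eq_true_eq]
  constructor
  · rintro ⟨j, hj, h⟩
    exact ⟨j, hj, by rw [← key j hj]; exact h⟩
  · rintro ⟨j, hj, h⟩
    exact ⟨j, hj, by rw [key j hj]; exact h⟩

-- ===== VERDICT (by name: the statement is the Claim_ definition above) =====
theorem is_centered_spec : Claim_equal_is_centered := by
  intro v n _
  unfold Spec_is_centered
  by_cases hv : v = []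
  · subst hv; rfl
  rw [alt_char v n hv]
  have hL : 1 ≤ v.length := List.length_pos_iff.mpr hv
  unfold is_centered
  rw [if_neg hv]
  by_cases hez : n = 0 ∧ PySem.Int.mod (v.length : Int) 2 = 0
  · -- A returns true; B finds the empty center window (j = L/2, sum 0 = n)
    rw [if_pos hez]
    have heven : v.length % 2 = 0 := by
      have := hez.2
      rw [PySem.Int.mod_eq_emod_of_pos (by norm_num)] at this
      omega
    have hW : Wsum v (v.length / 2) = 0 := by
      unfold Wsum
      have : v.length - v.length / 2 = v.length / 2 := by omega
      rw [this]; ring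
    symm
    rw [List.any_eq_true]
    exact ⟨v.length / 2, List.mem_range.mpr (by omega), by simp [hW, hez.1]⟩
  · rw [if_neg hez]
    have hb : PySem.Int.floordiv (v.length : Int) 2 = ((v.length / 2 : Nat) : Int) := by
      rw [PySem.Int.floordiv_eq_ediv_of_pos (by norm_num)]; push_cast; omega
    have ha : PySem.Int.floordiv ((v.length : Int) - 1) 2 =
        (((v.length - 1) / 2 : Nat) : Int) := by
      rw [PySem.Int.floordiv_eq_ediv_of_pos (by norm_num)]
      have e : (v.length : Int) - 1 = ((v.length - 1 : Nat) : Int) := by omega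
      rw [e]; push_cast; omega
    simp only [hb, ha]
    by_cases hodd : v.length % 2 = 1
    · -- odd length: a = b = L/2, initial s = v[a] = Wsum (L/2)
      have hab : (((v.length - 1) / 2 : Nat) : Int) = ((v.length / 2 : Nat) : Int) := by
        congr 1; omega
      rw [if_pos hab, hab]
      have hlt : v.length / 2 < v.length := by omega
      have hs : PySem.List.pyGetD v ((v.length / 2 : Nat) : Int) 0 = Wsum v (v.length / 2) := by
        rw [PySem.List.pyGetD_natCast, List.getD_eq_getElem _ _ hlt]
        unfold Wsum
        have t : v.length - v.length / 2 = v.length / 2 + 1 := by omega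
        rw [t, sum_take_succ v (v.length / 2) hlt]
        ring
      have hbarg : ((v.length / 2 : Nat) : Int) = (v.length : Int) - 1 - ((v.length / 2 : Nat) : Int) := by
        push_cast; omega
      rw [hs]
      have hloop := loop_eq v n (v.length / 2) hlt
      rw [← hbarg] at hloop
      exact hloop
    · -- even length, n ≠ 0: a = L/2 - 1, s = v[a] + v[b] = Wsum (L/2 - 1)
      have heven : v.length % 2 = 0 := by omega
      have hn : n ≠ 0 := by
        intro h0
        exact hez ⟨h0, by rw [PySem.Int.mod_eq_emod_of_pos (by norm_num)]; omega⟩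
      have hL2 : 2 ≤ v.length := by omega
      set a0 := v.length / 2 - 1 with ha0
      have hane : (((v.length - 1) / 2 : Nat) : Int) ≠ ((v.length / 2 : Nat) : Int) := by
        have : (v.length - 1) / 2 ≠ v.length / 2 := by omega
        exact_mod_cast fun h => this (Nat.cast_injective h)
      rw [if_neg hane]
      have hre : ((v.length - 1) / 2 : Nat) = a0 := by omega
      have hreb : (v.length / 2 : Nat) = a0 + 1 := by omega
      have hlt1 : a0 < v.length := by omega
      have hlt2 : a0 + 1 < v.length := by omega
      have hs : PySem.List.pyGetD v (((v.length - 1) / 2 : Nat) : Int) 0 +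
          PySem.List.pyGetD v ((v.length / 2 : Nat) : Int) 0 = Wsum v a0 := by
        rw [hre, hreb, PySem.List.pyGetD_natCast, PySem.List.pyGetD_natCast,
            List.getD_eq_getElem _ _ hlt1, List.getD_eq_getElem _ _ hlt2]
        unfold Wsum
        have t : v.length - a0 = (a0 + 1) + 1 := by omega
        rw [t, sum_take_succ v (a0 + 1) hlt2, sum_take_succ v a0 hlt1]
        ring
      rw [hs]
      have hbarg : ((v.length / 2 : Nat) : Int) = (v.length : Int) - 1 - ((a0 : Nat) : Int) := by
        push_cast; omega
      rw [hre, hbarg]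
      rw [loop_eq v n a0 hlt1]
      -- B scans one more window (j = L/2), whose sum 0 ≠ n
      have hW0 : Wsum v (a0 + 1) = 0 := by
        unfold Wsum
        have : v.length - (a0 + 1) = a0 + 1 := by omega
        rw [this]; ring
      have hr : v.length / 2 + 1 = (a0 + 1) + 1 := by omega
      have hsplit : (List.range ((a0 + 1) + 1)).any (fun j => decide (Wsum v j = n)) =
          ((List.range (a0 + 1)).any (fun j => decide (Wsum v j = n)) ||
            decide (Wsum v (a0 + 1) = n)) := by
        rw [List.range_succ, List.any_append]
        simp
      have hd : (decide ((0 : Int) = n)) = false := decide_eq_false (fun h => hn h.symm)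
      rw [hr, hsplit, hW0, hd, Bool.or_false]
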